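-- pv_equiv track=rewrite | github.com/cdccnleo/RQA2025 | scripts/generate_api_docs.py | _is_api_function
-- ===== SOURCE A (Python) =====
-- from typing import Dict, List, Any, Optional, Tuple
--
-- def _is_api_function(func_name: str, class_name: Optional[str]) -> bool:
--     """检查是否是API函数"""
--     # 排除私有方法
--     if func_name.startswith('_'):
--         return False
--
--     # 包含公共API方法
--     api_methods = ['get_', 'post_', 'put_', 'delete_', 'create_', 'update_',
--                   'delete_', 'find_', 'search_', 'list_', 'execute_', 'process_',
--                   'authenticate_', 'authorize_', 'validate_', 'check_']
--
--     return any(func_name.startswith(method) for method in api_methods) or \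
--            len(func_name) > 3  # 简单的启发式方法
-- ===== SOURCE B (Python) =====
-- from typing import Optional
--
-- def _is_api_function(func_name: str, class_name: Optional[str]) -> bool:
--     # Every public-API prefix A scans has length >= 4, so a prefix match
--     # already implies len > 3; the scan is redundant and dropped.
--     return not func_name.startswith('_') and len(func_name) > 3
-- ===== Notes on version B (the rewrite author's own statement) =====
-- stated objective: simpler
-- what changed: B drops the 16-element api_methods list and the any(...) prefix scan entirely: every prefix has length >= 4, so a match already implies len > 3, leaving the pure predicate 'not startswith('_') and len > 3'.
import Mathlib
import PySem

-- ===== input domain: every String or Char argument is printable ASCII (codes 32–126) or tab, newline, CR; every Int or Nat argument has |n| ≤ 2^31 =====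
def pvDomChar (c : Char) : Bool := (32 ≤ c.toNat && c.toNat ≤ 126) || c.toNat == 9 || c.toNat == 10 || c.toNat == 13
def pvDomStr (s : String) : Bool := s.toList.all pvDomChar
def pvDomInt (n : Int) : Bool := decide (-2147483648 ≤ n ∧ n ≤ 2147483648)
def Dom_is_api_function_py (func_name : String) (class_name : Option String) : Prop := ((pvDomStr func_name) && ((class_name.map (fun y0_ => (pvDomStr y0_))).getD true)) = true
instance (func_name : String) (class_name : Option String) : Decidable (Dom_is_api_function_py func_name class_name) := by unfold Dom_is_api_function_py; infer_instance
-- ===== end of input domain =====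

-- B replaces A's 16-prefix any(...) scan by the equivalent pure predicate
-- 'not startswith('_') and len > 3' (every prefix has length ≥ 4), for simplicity.

-- ===== PORT A =====
def pvApiMethods : List String :=
  ["get_", "post_", "put_", "delete_", "create_", "update_",
   "delete_", "find_", "search_", "list_", "execute_", "process_",
   "authenticate_", "authorize_", "validate_", "check_"]

def is_api_function_py (func_name : String) (class_name : Option String) : Bool :=
  if PySem.Str.startswith func_name "_" then
    false
  else
    (pvApiMethods.any (fun method => PySem.Str.startswith func_name method)) ||
      decide (PySem.Str.len func_name > 3)

-- ===== PORT B =====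
def is_api_function_py_alt (func_name : String) (class_name : Option String) : Bool :=
  !PySem.Str.startswith func_name "_" && decide (PySem.Str.len func_name > 3)

-- ===== PRECONDITION & SPEC =====
def Spec_is_api_function_py (func_name : String) (class_name : Option String) (out : Bool) : Prop := out = is_api_function_py_alt func_name class_name
instance (func_name : String) (class_name : Option String) (out : Bool) : Decidable (Spec_is_api_function_py func_name class_name out) := by unfold Spec_is_api_function_py; infer_instance

-- ===== CLAIM (what is proved, stated in full; the proofs are below) =====
def Claim_equal_is_api_function_py : Prop := ∀ (func_name : String) (class_name : Option String), Dom_is_api_function_py func_name class_name → Spec_is_api_function_py func_name class_name (is_api_function_py func_name class_name)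

-- ===== LEMMAS AND PROOFS =====

-- A prefix match with any element of pvApiMethods forces length > 3: each prefix has ≥ 4 chars.
theorem pv_prefix_long (s : String) (m : String) (hm : m ∈ pvApiMethods)
    (h : PySem.Str.startswith s m = true) : 3 < PySem.Str.len s := by
  have h' : m.toList <+: s.toList := by
    rw [PySem.Str.startswith_eq] at h
    exact (PySem.Chars.startswith_iff _ _).mp h
  have hlen : m.toList.length ≤ s.toList.length := h'.length_le
  have h4 : 4 ≤ m.toList.length := by
    fin_cases hm <;> decide
  rw [PySem.Str.len_eq]
  omega

theorem is_api_function_py_spec : Claim_equal_is_api_function_py := by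
  intro func_name class_name _
  unfold Spec_is_api_function_py is_api_function_py is_api_function_py_alt
  cases hu : PySem.Str.startswith func_name "_" with
  | true => rfl
  | false =>

    simp only [if_neg Bool.false_ne_true, Bool.not_false, Bool.true_and]
    by_cases h3 : 3 < PySem.Str.len func_name
    · simp only [decide_eq_true h3, Bool.or_true]
    · simp only [decide_eq_false h3, Bool.or_false]
      rw [List.any_eq_false]
      intro m hm
      intro hs
      exact h3 (pv_prefix_long func_name m hm hs)
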